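-- pv_equiv track=rewrite | github.com/nzooherd/leetcode | Algorithms/拼接最大数.py | package_list
-- ===== SOURCE A (Python) =====
-- def package_list(num_list1, num_list2):
--     num_list = []
--     i = 0
--     j = 0
--     while i < len(num_list1) and j < len(num_list2):
--         if num_list1[i] > num_list2[j]:
--             num_list.append(num_list1[i])
--             i += 1
--         elif num_list1[i] < num_list2[j]:
--             num_list.append(num_list2[j])
--             j += 1
--         else:
--             temp_i = i + 1
--             temp_j = j + 1
--             while temp_i < len(num_list1) and temp_j < len(num_list2) and num_list1[temp_i] == num_list2[temp_j]:
--                 temp_i += 1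
--                 temp_j += 1
--             if temp_i == len(num_list1):
--                 num_list.append(num_list2[j])
--                 j += 1
--             elif temp_j == len(num_list2):
--                 num_list.append(num_list1[i])
--                 i += 1
--             elif num_list1[temp_i] > num_list2[temp_j]:
--                 num_list.append(num_list1[i])
--                 i += 1
--             else:
--                 num_list.append(num_list2[j])
--                 j += 1
--
--
--
--
--     if i >= len(num_list1):
--         num_list += num_list2[j:]
--     else:
--         num_list += num_list1[i:]
--
--     return num_list
-- ===== SOURCE B (Python) =====
-- def package_list(num_list1, num_list2):
--     out = []
--     a = num_list1[:]
--     b = num_list2[:]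
--     while a and b:
--         if a > b:
--             out.append(a.pop(0))
--         else:
--             out.append(b.pop(0))
--     return out + a + b
-- ===== Notes on version B (the rewrite author's own statement) =====
-- stated objective: simpler
-- what changed: Replaces A's index-based merge with its hand-written equal-run inner scan and three-way tie resolution by a short loop that pops from the list whose remaining suffix is lexicographically greater (Python's built-in list comparison), with one uniform tail append.
import Mathlib
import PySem

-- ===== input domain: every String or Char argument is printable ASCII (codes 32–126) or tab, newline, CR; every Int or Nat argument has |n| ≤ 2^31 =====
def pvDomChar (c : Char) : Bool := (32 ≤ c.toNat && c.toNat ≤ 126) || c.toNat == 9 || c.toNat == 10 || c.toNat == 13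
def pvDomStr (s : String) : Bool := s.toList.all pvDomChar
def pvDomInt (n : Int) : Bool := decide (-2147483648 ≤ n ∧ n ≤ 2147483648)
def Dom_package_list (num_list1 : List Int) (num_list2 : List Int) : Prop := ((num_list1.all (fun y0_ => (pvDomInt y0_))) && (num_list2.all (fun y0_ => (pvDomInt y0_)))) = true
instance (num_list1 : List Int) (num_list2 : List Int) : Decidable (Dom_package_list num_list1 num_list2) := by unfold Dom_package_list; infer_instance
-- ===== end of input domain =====

-- B replaces A's hand-written equal-run tie scan by the built-in lexicographic
-- comparison of the remaining suffixes (objective: simpler).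
-- ===== PORT A =====
-- inner 'while temp_i < len and temp_j < len and l1[temp_i] == l2[temp_j]' loop
def pvInnerScan (l1 l2 : List Int) (ti tj : Nat) : Nat × Nat :=
  if ti < l1.length ∧ tj < l2.length ∧ l1.getD ti 0 = l2.getD tj 0 then
    pvInnerScan l1 l2 (ti + 1) (tj + 1)
  else (ti, tj)
termination_by l1.length - ti

-- outer 'while i < len(num_list1) and j < len(num_list2)' loop with accumulator num_list
def pvOuterLoop (l1 l2 : List Int) (acc : List Int) (i j : Nat) : List Int :=
  if i < l1.length ∧ j < l2.length then
    let x := l1.getD i 0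
    let y := l2.getD j 0
    if x > y then pvOuterLoop l1 l2 (acc ++ [x]) (i + 1) j
    else if x < y then pvOuterLoop l1 l2 (acc ++ [y]) i (j + 1)
    else
      let p := pvInnerScan l1 l2 (i + 1) (j + 1)
      if p.1 = l1.length then pvOuterLoop l1 l2 (acc ++ [y]) i (j + 1)
      else if p.2 = l2.length then pvOuterLoop l1 l2 (acc ++ [x]) (i + 1) j
      else if l1.getD p.1 0 > l2.getD p.2 0 then pvOuterLoop l1 l2 (acc ++ [x]) (i + 1) j
      else pvOuterLoop l1 l2 (acc ++ [y]) i (j + 1)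
  else if l1.length ≤ i then acc ++ l2.drop j   -- num_list += num_list2[j:]
  else acc ++ l1.drop i                         -- num_list += num_list1[i:]
termination_by (l1.length - i) + (l2.length - j)

def package_list (num_list1 : List Int) (num_list2 : List Int) : List Int :=
  pvOuterLoop num_list1 num_list2 [] 0 0

-- ===== PORT B =====
-- Python's '>' on lists of ints (lexicographic, longer wins on equal prefix)
def pvListGt : List Int → List Int → Bool
  | [], _ => false
  | _ :: _, [] => true
  | x :: xs, y :: ys => if x > y then true else if x < y then false else pvListGt xs ys

-- 'while a and b: pop from the greater side' loop of Source B, then 'out + a + b'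
def pvAltLoop (out : List Int) (a b : List Int) : List Int :=
  match a, b with
  | x :: xs, y :: ys =>
      if pvListGt (x :: xs) (y :: ys) then pvAltLoop (out ++ [x]) xs (y :: ys)
      else pvAltLoop (out ++ [y]) (x :: xs) ys
  | _, _ => out ++ a ++ b
termination_by a.length + b.length

def package_list_alt (num_list1 : List Int) (num_list2 : List Int) : List Int :=
  pvAltLoop [] num_list1 num_list2

-- ===== PRECONDITION & SPEC =====
def Spec_package_list (num_list1 : List Int) (num_list2 : List Int) (out : List Int) : Prop := out = package_list_alt num_list1 num_list2
instance (num_list1 : List Int) (num_list2 : List Int) (out : List Int) : Decidable (Spec_package_list num_list1 num_list2 out) := by unfold Spec_package_list; infer_instance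

-- ===== CLAIM (what is proved, stated in full; the proofs are below) =====
def Claim_equal_package_list : Prop := ∀ (num_list1 : List Int) (num_list2 : List Int), Dom_package_list num_list1 num_list2 → Spec_package_list num_list1 num_list2 (package_list num_list1 num_list2)

-- ===== LEMMAS AND PROOFS =====

theorem innerScan_char (l1 l2 : List Int) (n : Nat) :
    ∀ ti tj, l1.length - ti ≤ n → ti ≤ l1.length → tj ≤ l2.length →
    pvListGt (l1.drop ti) (l2.drop tj) =
      (decide (¬ (pvInnerScan l1 l2 ti tj).1 = l1.length) &&
       (decide ((pvInnerScan l1 l2 ti tj).2 = l2.length) ||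
        decide (l1.getD (pvInnerScan l1 l2 ti tj).1 0 > l2.getD (pvInnerScan l1 l2 ti tj).2 0))) := by
  induction n with
  | zero =>
    intro ti tj hn h1 h2
    have hti : ti = l1.length := by omega
    subst hti
    rw [pvInnerScan]
    simp [pvListGt, List.drop_length]
  | succ n ih =>
    intro ti tj hn h1 h2
    by_cases hc : ti < l1.length ∧ tj < l2.length ∧ l1.getD ti 0 = l2.getD tj 0
    · obtain ⟨h1', h2', heq⟩ := hc
      rw [pvInnerScan, if_pos ⟨h1', h2', heq⟩]
      rw [List.drop_eq_getElem_cons h1', List.drop_eq_getElem_cons h2']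
      have hx : l1[ti] = l1.getD ti 0 := (List.getD_eq_getElem _ _ h1').symm
      have hy : l2[tj] = l2.getD tj 0 := (List.getD_eq_getElem _ _ h2').symm
      simp only [pvListGt, hx, hy, heq, lt_irrefl, if_false]
      exact ih (ti + 1) (tj + 1) (by omega) h1' h2'
    · rw [pvInnerScan, if_neg hc]
      simp only
      by_cases hti : ti < l1.length
      · by_cases htj : tj < l2.length
        · have hne : l1.getD ti 0 ≠ l2.getD tj 0 := fun h => hc ⟨hti, htj, h⟩
          rw [List.drop_eq_getElem_cons hti, List.drop_eq_getElem_cons htj]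
          have hx : l1[ti] = l1.getD ti 0 := (List.getD_eq_getElem _ _ hti).symm
          have hy : l2[tj] = l2.getD tj 0 := (List.getD_eq_getElem _ _ htj).symm
          simp only [pvListGt, hx, hy]
          have hti' : ¬ ti = l1.length := by omega
          have htj' : ¬ tj = l2.length := by omega
          simp only [hti', htj', decide_false, not_false_eq_true, decide_true,
            Bool.true_and, Bool.false_or]
          rcases lt_trichotomy (l1.getD ti 0) (l2.getD tj 0) with h | h | h
          · rw [if_neg (by omega : ¬ l1.getD ti 0 > l2.getD tj 0), if_pos h]
            exact (decide_eq_false (by omega)).symm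
          · exact absurd h hne
          · rw [if_pos h]
            exact (decide_eq_true h).symm
        · have htj' : tj = l2.length := by omega
          subst htj'
          rw [List.drop_eq_getElem_cons hti, List.drop_length]
          have hti' : ¬ ti = l1.length := by omega
          simp [pvListGt, hti']
      · have hti' : ti = l1.length := by omega
        subst hti'
        simp [pvListGt, List.drop_length]

theorem loop_eq_aux (l1 l2 : List Int) (n : Nat) :
    ∀ acc i j, (l1.length - i) + (l2.length - j) ≤ n →
    pvOuterLoop l1 l2 acc i j = pvAltLoop acc (l1.drop i) (l2.drop j) := by
  induction n with
  | zero =>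
    intro acc i j hn
    have hi : l1.length ≤ i := by omega
    have hj : l2.length ≤ j := by omega
    rw [pvOuterLoop, if_neg (by omega), if_pos hi]
    rw [List.drop_eq_nil_of_le hi, List.drop_eq_nil_of_le hj, pvAltLoop]
    · simp
    · exact fun x xs y ys h _ => nomatch h
  | succ n ih =>
    intro acc i j hn
    by_cases h : i < l1.length ∧ j < l2.length
    · obtain ⟨hi, hj⟩ := h
      rw [pvOuterLoop, if_pos ⟨hi, hj⟩]
      rw [List.drop_eq_getElem_cons hi, List.drop_eq_getElem_cons hj, pvAltLoop]
      have hx : l1[i] = l1.getD i 0 := (List.getD_eq_getElem _ _ hi).symm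
      have hy : l2[j] = l2.getD j 0 := (List.getD_eq_getElem _ _ hj).symm
      simp only [pvListGt, hx, hy]
      rcases lt_trichotomy (l1.getD i 0) (l2.getD j 0) with hlt | heq | hgt
      · rw [if_neg (by omega : ¬ l1.getD i 0 > l2.getD j 0),
            if_pos hlt, if_neg (by omega : ¬ l1.getD i 0 > l2.getD j 0), if_pos hlt]
        rw [if_neg Bool.false_ne_true,
            ih (acc ++ [l2.getD j 0]) i (j + 1) (by omega),
            List.drop_eq_getElem_cons hi, hx]
      · rw [if_neg (by omega : ¬ l1.getD i 0 > l2.getD j 0),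
            if_neg (by omega : ¬ l1.getD i 0 < l2.getD j 0),
            if_neg (by omega : ¬ l1.getD i 0 > l2.getD j 0),
            if_neg (by omega : ¬ l1.getD i 0 < l2.getD j 0)]
        have hchar := innerScan_char l1 l2 l1.length (i + 1) (j + 1) (by omega) hi hj
        by_cases hp1 : (pvInnerScan l1 l2 (i + 1) (j + 1)).1 = l1.length
        · have hgtF : pvListGt (l1.drop (i + 1)) (l2.drop (j + 1)) = false := by
            rw [hchar]; simp [hp1]
          rw [if_pos hp1, hgtF, if_neg Bool.false_ne_true]
          rw [ih (acc ++ [l2.getD j 0]) i (j + 1) (by omega),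
              List.drop_eq_getElem_cons hi, hx]
        · by_cases hp2 : (pvInnerScan l1 l2 (i + 1) (j + 1)).2 = l2.length
          · have hgtT : pvListGt (l1.drop (i + 1)) (l2.drop (j + 1)) = true := by
              rw [hchar]; simp [hp1, hp2]
            rw [if_neg hp1, if_pos hp2, hgtT, if_pos rfl]
            rw [ih (acc ++ [l1.getD i 0]) (i + 1) j (by omega),
                List.drop_eq_getElem_cons hj, hy]
          · by_cases hcmp : l1.getD (pvInnerScan l1 l2 (i + 1) (j + 1)).1 0 >
                l2.getD (pvInnerScan l1 l2 (i + 1) (j + 1)).2 0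
            · have hgtT : pvListGt (l1.drop (i + 1)) (l2.drop (j + 1)) = true := by
                rw [hchar, decide_eq_true hp1, decide_eq_false hp2, decide_eq_true hcmp]; rfl
              rw [if_neg hp1, if_neg hp2, if_pos hcmp, hgtT, if_pos rfl]
              rw [ih (acc ++ [l1.getD i 0]) (i + 1) j (by omega),
                  List.drop_eq_getElem_cons hj, hy]
            · have hgtF : pvListGt (l1.drop (i + 1)) (l2.drop (j + 1)) = false := by
                rw [hchar, decide_eq_true hp1, decide_eq_false hp2, decide_eq_false hcmp]; rfl
              rw [if_neg hp1, if_neg hp2, if_neg hcmp, hgtF,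
                  if_neg Bool.false_ne_true]
              rw [ih (acc ++ [l2.getD j 0]) i (j + 1) (by omega),
                  List.drop_eq_getElem_cons hi, hx]
      · rw [if_pos hgt, if_pos hgt, if_pos rfl]
        rw [ih (acc ++ [l1.getD i 0]) (i + 1) j (by omega),
            List.drop_eq_getElem_cons hj, hy]
    · rw [pvOuterLoop, if_neg h]
      by_cases hi : l1.length ≤ i
      · rw [if_pos hi, List.drop_eq_nil_of_le hi, pvAltLoop]
        · simp
        · exact fun x xs y ys h _ => nomatch h
      · have hj : l2.length ≤ j := by omega
        rw [if_neg hi, List.drop_eq_nil_of_le hj, pvAltLoop]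
        · simp
        · exact fun x xs y ys _ h => nomatch h

theorem loop_eq (l1 l2 acc : List Int) (i j : Nat) :
    pvOuterLoop l1 l2 acc i j = pvAltLoop acc (l1.drop i) (l2.drop j) :=
  loop_eq_aux l1 l2 ((l1.length - i) + (l2.length - j)) acc i j le_rfl

-- ===== VERDICT (by name: the statement is the Claim_ definition above) =====
theorem package_list_spec : Claim_equal_package_list := by
  intro l1 l2 _
  unfold Spec_package_list package_list package_list_alt
  simpa using loop_eq l1 l2 [] 0 0
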